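-- pv_equiv track=rewrite | github.com/tmdrn9/baekjoon | 4659.py | three_type
-- ===== SOURCE A (Python) =====
-- def aeiou(s):
--     return s=='a' or s=='e' or s=='i' or s=='o' or s=='u'
--
-- def three_type(st):
--     N=len(st)
--     if N<3:
--         return True
--
--     for i in range(N-2):
--         if aeiou(st[i]) ==aeiou(st[i+1]) ==aeiou(st[i+2]):
--             return False
--     return True
-- ===== SOURCE B (Python) =====
-- def three_type(st):
--     # run-length scan: track the length of the current run of equal vowel-type;
--     # a run of length 3 means three consecutive chars of the same type.
--     prev = None
--     run = 0
--     for ch in st: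
--         t = ch in 'aeiou'
--         run = run + 1 if t == prev else 1
--         if run >= 3:
--             return False
--         prev = t
--     return True
-- ===== Notes on version B (the rewrite author's own statement) =====
-- stated objective: alternative
-- what changed: Replaces the overlapping index-window scan (checking st[i],st[i+1],st[i+2] for each i) with a single run-length pass that counts the current run of equal vowel-type and fails as soon as a run reaches 3.
import Mathlib
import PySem

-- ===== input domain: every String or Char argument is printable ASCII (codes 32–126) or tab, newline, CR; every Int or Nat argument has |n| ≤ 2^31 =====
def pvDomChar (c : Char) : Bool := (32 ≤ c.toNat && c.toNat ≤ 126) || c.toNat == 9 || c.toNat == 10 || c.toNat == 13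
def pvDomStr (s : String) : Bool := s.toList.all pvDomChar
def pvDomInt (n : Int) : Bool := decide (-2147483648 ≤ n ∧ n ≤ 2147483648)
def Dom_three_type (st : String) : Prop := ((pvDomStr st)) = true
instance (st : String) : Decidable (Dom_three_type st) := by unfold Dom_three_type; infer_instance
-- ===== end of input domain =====

-- B changes the algorithm: a single run-length pass over the characters instead of
-- A's overlapping three-index window scan; same return value, no speed claim.

-- ===== PORT A =====
def aeiou (c : Char) : Bool := (c == 'a') || (c == 'e') || (c == 'i') || (c == 'o') || (c == 'u')

-- st[i] for an index produced by range(N-2) is always in range; none never occurs there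
def aeiouAt (st : String) (i : Int) : Bool :=
  match PySem.Str.pyGet? st i with
  | some c => aeiou c
  | none => false

def three_type (st : String) : Bool :=
  let N : Int := PySem.Str.len st
  if N < 3 then true
  else
    -- 'for i in range(N-2): if cond: return False' then 'return True'
    if (PySem.List.pyRange 0 (N - 2) 1).any (fun i =>
        (aeiouAt st i == aeiouAt st (i + 1)) && (aeiouAt st (i + 1) == aeiouAt st (i + 2)))
    then false else true

-- ===== PORT B =====
def vowB (c : Char) : Bool := ['a', 'e', 'i', 'o', 'u'].contains c   -- ch in 'aeiou'

-- the loop of Source B: prev = vowel-type of the previous char (None before the first), run = current run length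
def altGo : List Char → Option Bool → Nat → Bool
  | [], _, _ => true
  | c :: cs, prev, run =>
    let t := vowB c
    let run' := if (some t == prev) then run + 1 else 1
    if 3 ≤ run' then false else altGo cs (some t) run'

def three_type_alt (st : String) : Bool := altGo st.toList none 0

-- ===== PRECONDITION & SPEC =====
def Spec_three_type (st : String) (out : Bool) : Prop := out = three_type_alt st
instance (st : String) (out : Bool) : Decidable (Spec_three_type st out) := by unfold Spec_three_type; infer_instance

-- ===== CLAIM (what is proved, stated in full; the proofs are below) =====
def Claim_equal_three_type : Prop := ∀ (st : String), Dom_three_type st → Spec_three_type st (three_type st)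

-- ===== LEMMAS AND PROOFS =====

-- common specification: no three consecutive equal booleans
def noTriple : List Bool → Bool
  | a :: b :: c :: rest => if a == b && b == c then false else noTriple (b :: c :: rest)
  | _ => true

def bad3 (t : List Bool) (k : Nat) : Bool :=
  (t.getD k false == t.getD (k + 1) false) && (t.getD (k + 1) false == t.getD (k + 2) false)

lemma vow_eq (c : Char) : vowB c = aeiou c := by
  unfold vowB aeiou
  simp [Bool.or_assoc, beq_eq_decide]

lemma any_congr' {α : Type} (l : List α) (p q : α → Bool) (h : ∀ x ∈ l, p x = q x) :
    l.any p = l.any q := by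
  induction l with
  | nil => rfl
  | cons a l ih =>
    simp only [List.any_cons, h a (List.mem_cons_self), ih (fun x hx => h x (List.mem_cons_of_mem _ hx))]

lemma noTriple_cons_ne (p b : Bool) (bs : List Bool) (h : (p == b) = false) :
    noTriple (p :: b :: bs) = noTriple (b :: bs) := by
  cases bs with
  | nil => rfl
  | cons c cs => simp [noTriple, h]

lemma altGo_run (bs : List Char) : ∀ p : Bool,
    (altGo bs (some p) 1 = noTriple (p :: bs.map vowB)) ∧
    (altGo bs (some p) 2 = noTriple (p :: p :: bs.map vowB)) := by
  induction bs with
  | nil => intro p; constructor <;> simp [altGo, noTriple]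
  | cons c cs ih =>
    intro p
    by_cases h : vowB c = p
    · subst h
      refine ⟨?_, ?_⟩
      · have step : altGo (c :: cs) (some (vowB c)) 1 = altGo cs (some (vowB c)) 2 := by
          simp [altGo]
        rw [List.map_cons, step, (ih (vowB c)).2]
      · have step : altGo (c :: cs) (some (vowB c)) 2 = false := by simp [altGo]
        rw [List.map_cons, step]
        simp [noTriple]
    · have hb : (vowB c == p) = false := by simp [h]
      have hb' : (p == vowB c) = false := by
        simp only [beq_eq_false_iff_ne]; exact fun e => h e.symm
      refine ⟨?_, ?_⟩
      · have step : altGo (c :: cs) (some p) 1 = altGo cs (some (vowB c)) 1 := by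
          simp [altGo, hb]
        rw [List.map_cons, step, (ih (vowB c)).1, noTriple_cons_ne p (vowB c) _ hb']
      · have step : altGo (c :: cs) (some p) 2 = altGo cs (some (vowB c)) 1 := by
          simp [altGo, hb]
        rw [List.map_cons, step, (ih (vowB c)).1]
        have h1 : noTriple (p :: p :: vowB c :: cs.map vowB)
            = noTriple (p :: vowB c :: cs.map vowB) := by simp [noTriple, hb']
        rw [h1, noTriple_cons_ne p (vowB c) _ hb']

lemma alt_eq_noTriple (st : String) : three_type_alt st = noTriple (st.toList.map vowB) := by
  unfold three_type_alt
  cases h : st.toList with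
  | nil => simp [altGo, noTriple]
  | cons c cs =>
    simp only [altGo]
    norm_num
    exact (altGo_run cs (vowB c)).1

lemma noTriple_short (t : List Bool) (h : t.length < 3) : noTriple t = true := by
  match t, h with
  | [], _ => rfl
  | [a], _ => rfl
  | [a, b], _ => rfl

lemma bad3_succ (a : Bool) (t : List Bool) (k : Nat) : bad3 (a :: t) (k + 1) = bad3 t k := by
  simp [bad3]

lemma anyRange (t : List Bool) : (List.range (t.length - 2)).any (bad3 t) = !noTriple t := by
  match t with
  | [] => rfl
  | [a] => rfl
  | [a, b] => rfl
  | a :: b :: c :: r =>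
    have hlen : (a :: b :: c :: r).length - 2 = r.length + 1 := by simp
    rw [hlen, List.range_succ_eq_map, List.any_cons, List.any_map]
    have h1 : (List.range r.length).any (bad3 (a :: b :: c :: r) ∘ Nat.succ)
        = (List.range ((b :: c :: r).length - 2)).any (bad3 (b :: c :: r)) := by
      have : (b :: c :: r).length - 2 = r.length := by simp
      rw [this]
      exact any_congr' _ _ _ (fun k _ => bad3_succ a (b :: c :: r) k)
    rw [h1, anyRange (b :: c :: r)]
    have hb0 : bad3 (a :: b :: c :: r) 0 = (a == b && b == c) := by simp [bad3]
    rw [hb0]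
    by_cases h : (a == b && b == c) = true
    · simp [noTriple, h]
    · simp only [noTriple]
      rw [if_neg h]
      simp [Bool.eq_false_iff.mp (Bool.not_eq_true _ ▸ h)]

lemma aeiouAt_int (st : String) (i : Int) (h0 : 0 ≤ i) (hi : i < (st.toList.length : Int)) :
    aeiouAt st i = (st.toList.map aeiou).getD i.toNat false := by
  obtain ⟨k, rfl⟩ : ∃ k : Nat, i = (k : Int) := ⟨i.toNat, by omega⟩
  have hk : k < st.toList.length := by omega
  unfold aeiouAt
  rw [PySem.Str.pyGet?_natCast]
  simp [List.getD, List.getElem?_map, List.getElem?_eq_getElem hk]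

-- ===== VERDICT (by name: the statement is the Claim_ definition above) =====
theorem three_type_spec : Claim_equal_three_type := by
  intro st _
  unfold Spec_three_type
  rw [alt_eq_noTriple]
  have hvw : st.toList.map vowB = st.toList.map aeiou := List.map_congr_left (fun c _ => vow_eq c)
  rw [hvw]
  unfold three_type
  have hN : PySem.Str.len st = (st.toList.length : Int) := by simp [PySem.Str.len_eq]
  rw [hN]
  by_cases h3 : (st.toList.length : Int) < 3
  · rw [if_pos h3]
    exact (noTriple_short _ (by rw [List.length_map]; omega)).symm
  · rw [if_neg h3]
    have hrange : PySem.List.pyRange 0 ((st.toList.length : Int) - 2) 1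
        = (List.range (st.toList.length - 2)).map (fun k : Nat => (0 : Int) + (k : Int)) := by
      rw [PySem.List.pyRange_one]
      have : ((st.toList.length : Int) - 2 - 0).toNat = st.toList.length - 2 := by omega
      rw [this]
    rw [hrange, List.any_map]
    have hany : (List.range (st.toList.length - 2)).any
        ((fun i => (aeiouAt st i == aeiouAt st (i + 1)) && (aeiouAt st (i + 1) == aeiouAt st (i + 2)))
          ∘ (fun k : Nat => (0 : Int) + (k : Int)))
        = (List.range ((st.toList.map aeiou).length - 2)).any (bad3 (st.toList.map aeiou)) := by
      rw [List.length_map]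
      apply any_congr'
      intro k hk
      rw [List.mem_range] at hk
      simp only [Function.comp_apply]
      rw [aeiouAt_int st _ (by omega) (by omega), aeiouAt_int st _ (by omega) (by omega),
          aeiouAt_int st _ (by omega) (by omega)]
      have e0 : ((0 : Int) + (k : Int)).toNat = k := by omega
      have e1 : ((0 : Int) + (k : Int) + 1).toNat = k + 1 := by omega
      have e2 : ((0 : Int) + (k : Int) + 2).toNat = k + 2 := by omega
      rw [e0, e1, e2]
      rfl
    rw [hany, anyRange]
    cases hnt : noTriple (st.toList.map aeiou) <;> simp
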